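-- pv_equiv track=rewrite | github.com/kanamekojima/DLRS | scripts/data_loader.py | get_top_left_point_list
-- ===== SOURCE A (Python) =====
-- def get_point_list(size, patch_size, stride):
--     """
--     Generate a list of top-left starting points for patch extraction
--     given the total size, patch size, and stride.
--     """
--     point_list = []
--     break_flag = False
--     point = 0
--     while break_flag is False:
--         if point + patch_size >= size:
--             point = size - patch_size
--             break_flag = True
--         if point >= 0:
--             point_list.append(point)
--         point += stride
--     return point_list
--
-- def get_top_left_point_list(width, height, patch_size, stride):
--     """
--     Create a list of top-left points for patch extraction
--     given the width, height, patch size, and stride.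
--     """
--     y_list = get_point_list(height, patch_size, stride)  # Vertical points
--     x_list = get_point_list(width, patch_size, stride)  # Horizontal points
--     top_left_point_list = []
--     # Create pairs of (x, y) coordinates for patch extraction
--     for y in y_list:
--         for x in x_list:
--             top_left_point_list.append([x, y])
--     return top_left_point_list
-- ===== SOURCE B (Python) =====
-- def get_top_left_point_list(width, height, patch_size, stride):
--     """
--     Closed-form version: compute the per-axis point COUNT by ceiling division,
--     then produce each [x, y] pair directly from a single flat index k via
--     divmod, clamping each coordinate to size - patch_size.  No axis lists and
--     no stepping loops are built at all.
--     """
--     def count(size):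
--         last = size - patch_size
--         if last < 0:
--             return 0
--         if last == 0:
--             return 1
--         return -(-last // stride) + 1
--
--     nx = count(width)
--     ny = count(height)
--     last_x = width - patch_size
--     last_y = height - patch_size
--     point_list = []
--     for k in range(nx * ny):
--         y, x = divmod(k, nx)
--         point_list.append([min(x * stride, last_x), min(y * stride, last_y)])
--     return point_list
-- ===== Notes on version B (the rewrite author's own statement) =====
-- stated objective: alternative
-- what changed: Instead of stepping a sentinel while-loop per axis and pairing the two lists with nested loops, B computes the per-axis point COUNT in closed form (ceiling division) and emits each [x, y] pair directly from a single flat index k via divmod (x = min((k % nx)*stride, width-patch_size), y = min((k // nx)*stride, height-patch_size)); no axis lists and no nested loops exist. Pre_ restricts to terminating inputs (stride > 0, or patch_size >= both dimensions), since otherwise A loops forever (and B's ceiling division raises on stride == 0).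
import Mathlib
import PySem

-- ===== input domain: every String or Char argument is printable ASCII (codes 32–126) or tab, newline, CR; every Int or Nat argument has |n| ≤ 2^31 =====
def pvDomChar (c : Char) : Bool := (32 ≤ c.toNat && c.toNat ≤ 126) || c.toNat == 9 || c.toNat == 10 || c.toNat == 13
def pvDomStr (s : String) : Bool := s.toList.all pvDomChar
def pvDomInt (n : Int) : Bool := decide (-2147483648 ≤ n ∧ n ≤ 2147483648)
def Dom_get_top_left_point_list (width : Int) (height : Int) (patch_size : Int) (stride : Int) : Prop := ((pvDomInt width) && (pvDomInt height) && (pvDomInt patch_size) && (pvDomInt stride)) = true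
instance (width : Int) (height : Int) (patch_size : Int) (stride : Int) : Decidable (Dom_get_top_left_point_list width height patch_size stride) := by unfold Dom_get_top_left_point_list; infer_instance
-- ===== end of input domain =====

-- B replaces A's sentinel while-loops and nested pairing loop entirely: it
-- computes per-axis point COUNTS in closed form (ceiling division) and emits
-- each [x, y] pair directly from one flat index via divmod with a clamp;
-- equivalence is claimed on the inputs where A terminates.


-- ===== PORT A =====
-- A's while-loop, step for step; the fuel only makes the recursion total
-- (on every input satisfying Pre_ it is never exhausted).
def pyPointLoop (size : Int) (patch_size : Int) (stride : Int) :
    Nat → Int → List Int → List Int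
  | 0, _, point_list => point_list
  | fuel + 1, point, point_list =>
    if point + patch_size ≥ size then
      -- break_flag = True branch: clamp, append if ≥ 0, loop ends
      let point' := size - patch_size
      if point' ≥ 0 then point_list ++ [point'] else point_list
    else
      let pl := if point ≥ 0 then point_list ++ [point] else point_list
      pyPointLoop size patch_size stride fuel (point + stride) pl

def get_point_list_A (size : Int) (patch_size : Int) (stride : Int) : List Int :=
  pyPointLoop size patch_size stride ((size - patch_size).toNat + 1) 0 []

def get_top_left_point_list (width : Int) (height : Int) (patch_size : Int) (stride : Int) : List (List Int) :=
  let y_list := get_point_list_A height patch_size stride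
  let x_list := get_point_list_A width patch_size stride
  y_list.foldl (fun acc y => x_list.foldl (fun acc x => acc ++ [[x, y]]) acc) []

-- ===== PORT B =====
-- number of patch positions along one axis, by ceiling division
def pvCount (patch_size : Int) (stride : Int) (size : Int) : Int :=
  let last := size - patch_size
  if last < 0 then 0
  else if last = 0 then 1
  else -(PySem.Int.floordiv (-last) stride) + 1

def get_top_left_point_list_alt (width : Int) (height : Int) (patch_size : Int) (stride : Int) : List (List Int) :=
  let nx := pvCount patch_size stride width
  let ny := pvCount patch_size stride height
  let last_x := width - patch_size
  let last_y := height - patch_size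
  (PySem.List.pyRange 0 (nx * ny) 1).map
    (fun k =>
      -- y, x = divmod(k, nx)
      let y := PySem.Int.floordiv k nx
      let x := PySem.Int.mod k nx
      [min (x * stride) last_x, min (y * stride) last_y])

-- ===== PRECONDITION & SPEC =====
-- Pre_ excludes exactly the non-terminating inputs: with stride ≤ 0 and the
-- patch smaller than either dimension, A's while-loop never reaches the break
-- (and B's ceiling division raises on stride == 0).
def Pre_get_top_left_point_list (width : Int) (height : Int) (patch_size : Int) (stride : Int) : Prop :=
  0 < stride ∨ (width ≤ patch_size ∧ height ≤ patch_size)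
instance (width : Int) (height : Int) (patch_size : Int) (stride : Int) : Decidable (Pre_get_top_left_point_list width height patch_size stride) := by unfold Pre_get_top_left_point_list; infer_instance

def pvWitness_get_top_left_point_list : Int × Int × Int × Int := (10, 8, 3, 2)

def Spec_get_top_left_point_list (width : Int) (height : Int) (patch_size : Int) (stride : Int) (out : List (List Int)) : Prop := out = get_top_left_point_list_alt width height patch_size stride
instance (width : Int) (height : Int) (patch_size : Int) (stride : Int) (out : List (List Int)) : Decidable (Spec_get_top_left_point_list width height patch_size stride out) := by unfold Spec_get_top_left_point_list; infer_instance

-- ===== CLAIM (what is proved, stated in full; the proofs are below) =====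
def Claim_equal_get_top_left_point_list : Prop := ∀ (width : Int) (height : Int) (patch_size : Int) (stride : Int), Dom_get_top_left_point_list width height patch_size stride → Pre_get_top_left_point_list width height patch_size stride → Spec_get_top_left_point_list width height patch_size stride (get_top_left_point_list width height patch_size stride)

-- ===== LEMMAS AND PROOFS =====

-- proof-side abbreviation: the i-th clamped point along one axis
def pvCoord (patch_size : Int) (stride : Int) (i : Int) (size : Int) : Int :=
  min (i * stride) (size - patch_size)

-- cons form of pyRange for an arbitrary positive step
lemma pyRange_cons_of_pos {s : Int} (a b : Int) (hs : 0 < s) (hab : a < b) :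
    PySem.List.pyRange a b s = a :: PySem.List.pyRange (a + s) b s := by
  rw [PySem.List.pyRange_of_pos a b hs, PySem.List.pyRange_of_pos (a + s) b hs]
  by_cases h2 : a + s < b
  · have hcount : (if a < b then ((b - a + s - 1) / s).toNat else 0)
        = (if a + s < b then ((b - (a + s) + s - 1) / s).toNat else 0) + 1 := by
      rw [if_pos hab, if_pos h2]
      have : b - a + s - 1 = (b - (a + s) + s - 1) + 1 * s := by ring
      rw [this, Int.add_mul_ediv_right _ _ (by omega : s ≠ 0)]
      have h0 : 0 ≤ b - (a + s) + s - 1 := by omega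
      have h0' : 0 ≤ (b - (a + s) + s - 1) / s := Int.ediv_nonneg h0 (by omega)
      omega
    rw [hcount, List.range_succ_eq_map, List.map_cons, List.map_map]
    congr 1
    · omega
    · apply List.map_congr_left; intro k _; simp [Function.comp]; ring
  · have hcount : (if a < b then ((b - a + s - 1) / s).toNat else 0) = 1 := by
      rw [if_pos hab]
      have h1 : 0 ≤ b - a - 1 := by omega
      have h2' : b - a - 1 < s := by omega
      have : b - a + s - 1 = (b - a - 1) + 1 * s := by ring
      rw [this, Int.add_mul_ediv_right _ _ (by omega : s ≠ 0),
          Int.ediv_eq_zero_of_lt h1 h2']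
      omega
    rw [hcount, if_neg h2]
    simp

lemma pyRange_nil_of_le {s : Int} (a b : Int) (hs : 0 < s) (hba : b ≤ a) :
    PySem.List.pyRange a b s = [] := by
  rw [PySem.List.pyRange_of_pos a b hs, if_neg (by omega)]
  simp

-- loop invariant for A's while-loop under a positive stride
lemma pyPointLoop_eq (size patch_size stride : Int) (hst : 0 < stride)
    (hlast : 0 ≤ size - patch_size) :
    ∀ (fuel : Nat) (point : Int) (acc : List Int), 0 ≤ point →
      size - patch_size - point < (fuel : Int) → 0 < fuel →
      pyPointLoop size patch_size stride fuel point acc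
        = acc ++ PySem.List.pyRange point (size - patch_size) stride
            ++ [size - patch_size] := by
  intro fuel
  induction fuel with
  | zero => intro point acc _ _ h; omega
  | succ n ih =>
    intro point acc hpt hfuel _
    by_cases hbr : point + patch_size ≥ size
    · simp only [pyPointLoop, if_pos hbr, if_pos hlast,
        pyRange_nil_of_le point (size - patch_size) hst (by omega)]
      simp
    · have hlt : point < size - patch_size := by omega
      simp only [pyPointLoop, if_neg hbr, if_pos hpt]
      rw [ih (point + stride) (acc ++ [point]) (by omega) (by omega) (by omega)]
      rw [pyRange_cons_of_pos point (size - patch_size) hst hlt]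
      simp

-- A's axis list in indexed closed form: pvCount many points, the i-th being pvCoord i
lemma axis_char (size patch_size stride : Int)
    (h : 0 < stride ∨ size ≤ patch_size) :
    ∃ n : Nat, pvCount patch_size stride size = (n : Int) ∧
      get_point_list_A size patch_size stride
        = (List.range n).map (fun i : Nat => pvCoord patch_size stride (i : Int) size) := by
  unfold get_point_list_A pvCount
  by_cases h1 : size - patch_size < 0
  · refine ⟨0, by simp [h1], ?_⟩
    have : (size - patch_size).toNat = 0 := by omega
    rw [this]
    simp only [pyPointLoop, if_pos (by omega : (0:Int) + patch_size ≥ size),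
      if_neg (by omega : ¬ (size - patch_size ≥ 0))]
    simp
  · by_cases h2 : size - patch_size = 0
    · refine ⟨1, by simp [h2], ?_⟩
      have ht : (size - patch_size).toNat = 0 := by omega
      rw [ht]
      simp only [pyPointLoop]
      rw [if_pos (by omega : (0:Int) + patch_size ≥ size),
          if_pos (by omega : size - patch_size ≥ 0)]
      simp [pvCoord, h2]
    · -- last > 0, hence stride > 0
      have hst : 0 < stride := by rcases h with h | h; exact h; omega
      have hlastpos : 0 < size - patch_size := by omega
      set last := size - patch_size with hlastdef
      set c : Int := -(PySem.Int.floordiv (-last) stride) with hc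
      have hbr : (c - 1) * stride < last ∧ last ≤ c * stride := by
        have := (PySem.Int.neg_floordiv_neg_eq_iff_of_pos (a := last) (b := stride) (q := c) hst).mp rfl
        exact this
      have hcpos : 0 < c := by
        by_contra hcn
        push Not at hcn
        have : c * stride ≤ 0 := mul_nonpos_iff.mpr (Or.inr ⟨hcn, le_of_lt hst⟩)
        omega
      refine ⟨c.toNat + 1, by rw [if_neg h1, if_neg h2]; push_cast; omega, ?_⟩
      rw [pyPointLoop_eq size patch_size stride hst (by omega)
        ((size - patch_size).toNat + 1) 0 [] le_rfl (by omega) (by omega)]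
      rw [PySem.List.pyRange_of_pos 0 last hst, if_pos (by omega : (0:Int) < last)]
      have hcount : ((last - 0 + stride - 1) / stride).toNat = c.toNat := by
        have hfd : PySem.Int.floordiv (last - 0 + stride - 1) stride = c := by
          rw [PySem.Int.floordiv_eq_iff_of_pos hst]
          constructor
          · nlinarith [hbr.1]
          · nlinarith [hbr.2]
        rw [PySem.Int.floordiv_eq_ediv_of_pos hst] at hfd
        omega
      rw [hcount, List.range_succ, List.map_append]
      congr 1
      · rw [List.nil_append]
        apply List.map_congr_left
        intro i hi
        have hi' : (i : Int) ≤ c - 1 := by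
          simp only [List.mem_range] at hi; omega
        have hle : (i : Int) * stride ≤ last := by
          have := mul_le_mul_of_nonneg_right hi' (le_of_lt hst)
          omega
        simp only [pvCoord, ← hlastdef]
        rw [min_eq_left hle]
        ring
      · have hcast : (c.toNat : Int) = c := by omega
        simp only [List.map_cons, List.map_nil, pvCoord, ← hlastdef, hcast]
        rw [min_eq_right hbr.2]

-- flat index over range (ny*nx) decomposes as a nested flatMap
lemma range_mul_flatMap {α : Type} (nx ny : Nat) (f : Nat → α) :
    (List.range (ny * nx)).map f
      = (List.range ny).flatMap (fun y => (List.range nx).map (fun x => f (y * nx + x))) := by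
  induction ny with
  | zero => simp
  | succ n ih =>
    rw [Nat.succ_mul, List.range_add, List.map_append, ih, List.range_succ,
        List.flatMap_append]
    simp [List.map_map, Function.comp]

-- A's pairing foldl is a flatMap
lemma pair_foldl_eq (ys xs : List Int) :
    ys.foldl (fun acc y => xs.foldl (fun acc x => acc ++ [[x, y]]) acc) []
      = ys.flatMap (fun y => xs.map (fun x => [x, y])) := by
  have hinner : ∀ (y : Int) (acc : List (List Int)),
      xs.foldl (fun acc x => acc ++ [[x, y]]) acc
        = acc ++ xs.map (fun x => [x, y]) := fun y acc =>
    PySem.List.foldl_append_singleton_eq_map (fun x => [x, y]) xs acc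
  calc ys.foldl (fun acc y => xs.foldl (fun acc x => acc ++ [[x, y]]) acc) []
      = ys.foldl (fun acc y => acc ++ xs.map (fun x => [x, y])) [] := by
        exact PySem.List.foldl_congr_mem ys _ _ []
          (fun acc y _ => hinner y acc)
    _ = [] ++ ys.flatMap (fun y => xs.map (fun x => [x, y])) :=
        PySem.List.foldl_append_eq_flatMap _ ys []
    _ = _ := by simp

-- the nested pairing of the indexed axis lists equals B's flat divmod map
lemma glue (width height patch_size stride : Int) (nx ny : Nat) :
    ((List.range ny).map (fun i : Nat => pvCoord patch_size stride (i : Int) height)).flatMap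
        (fun y => ((List.range nx).map (fun i : Nat => pvCoord patch_size stride (i : Int) width)).map
          (fun x => [x, y]))
      = (PySem.List.pyRange 0 ((nx : Int) * (ny : Int)) 1).map
          (fun k =>
            let y := PySem.Int.floordiv k (nx : Int)
            let x := PySem.Int.mod k (nx : Int)
            [min (x * stride) (width - patch_size),
             min (y * stride) (height - patch_size)]) := by
  have hN : (nx : Int) * (ny : Int) = ((nx * ny : Nat) : Int) := by push_cast; ring
  rw [hN, PySem.List.pyRange_zero_nat, List.map_map, Nat.mul_comm nx ny,
      range_mul_flatMap, List.flatMap_map]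
  apply List.flatMap_congr
  intro y _
  rw [List.map_map]
  apply List.map_congr_left
  intro x hx
  have hxlt : x < nx := List.mem_range.mp hx
  have hnx : 0 < nx := by omega
  simp only [Function.comp]
  rw [show ((y * nx + x : Nat) : Int) = ((y * nx + x : Nat) : Int) from rfl]
  have hmod : PySem.Int.mod ((y * nx + x : Nat) : Int) ((nx : Nat) : Int)
      = (((y * nx + x) % nx : Nat) : Int) := PySem.Int.mod_natCast _ _
  have hdiv : PySem.Int.floordiv ((y * nx + x : Nat) : Int) ((nx : Nat) : Int)
      = (((y * nx + x) / nx : Nat) : Int) := PySem.Int.floordiv_natCast _ _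
  have hm : (y * nx + x) % nx = x := by
    rw [Nat.mul_comm y nx, Nat.mul_add_mod, Nat.mod_eq_of_lt hxlt]
  have hd : (y * nx + x) / nx = y := by
    rw [Nat.mul_comm y nx, Nat.mul_add_div hnx, Nat.div_eq_of_lt hxlt]
    omega
  simp only [pvCoord]
  rw [hmod, hdiv, hm, hd]

-- ===== VERDICT (by name: the statement is the Claim_ definition above) =====
theorem get_top_left_point_list_spec : Claim_equal_get_top_left_point_list := by
  intro width height patch_size stride _ hpre
  have hprex : 0 < stride ∨ width ≤ patch_size := by
    unfold Pre_get_top_left_point_list at hpre; tauto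
  have hprey : 0 < stride ∨ height ≤ patch_size := by
    unfold Pre_get_top_left_point_list at hpre; tauto
  obtain ⟨nx, hnx, hxl⟩ := axis_char width patch_size stride hprex
  obtain ⟨ny, hny, hyl⟩ := axis_char height patch_size stride hprey
  unfold Spec_get_top_left_point_list get_top_left_point_list get_top_left_point_list_alt
  simp only [hnx, hny, hxl, hyl]
  rw [pair_foldl_eq]
  exact glue width height patch_size stride nx ny
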